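-- pv_equiv track=rewrite | github.com/alexspetty/nfield | tools/field_glyph.py | cumulative_polarity
-- ===== SOURCE A (Python) =====
-- def cumulative_polarity(digits):
--     """Compute cumulative digital root sequence from a list of digits."""
--     result = []
--     running = 0
--     for d in digits:
--         running += d
--         dr = running % 9
--         if dr == 0:
--             dr = 9
--         result.append(dr)
--     return result
-- ===== SOURCE B (Python) =====
-- def cumulative_polarity(digits):
--     """Compute cumulative digital root sequence from a list of digits."""
--     total = sum(digits)
--     out = []
--     for d in reversed(digits):
--         out.append(total % 9 or 9)
--         total -= d
--     out.reverse()
--     return out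
-- ===== Notes on version B (the rewrite author's own statement) =====
-- stated objective: alternative
-- what changed: B computes the grand total with sum() once, then traverses the list BACK-TO-FRONT, emitting the digital root of the current total and subtracting each element to recover earlier prefix sums, finally reversing the output; A scans forward accumulating a running sum.
import Mathlib
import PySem

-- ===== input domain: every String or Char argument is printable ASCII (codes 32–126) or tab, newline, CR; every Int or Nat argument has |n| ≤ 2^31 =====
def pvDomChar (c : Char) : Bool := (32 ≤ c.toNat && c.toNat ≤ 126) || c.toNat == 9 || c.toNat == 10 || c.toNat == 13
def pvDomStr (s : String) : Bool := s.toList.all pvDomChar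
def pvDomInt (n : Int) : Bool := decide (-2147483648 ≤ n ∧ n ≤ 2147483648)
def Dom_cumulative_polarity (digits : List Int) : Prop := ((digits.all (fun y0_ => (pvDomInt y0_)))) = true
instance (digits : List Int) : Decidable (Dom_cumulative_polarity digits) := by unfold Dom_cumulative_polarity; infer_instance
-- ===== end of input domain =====

-- B computes sum(digits) once, then walks the list back-to-front emitting digital roots while subtracting elements, then reverses the output (alternative traversal order, same cost).


-- ===== PORT A =====
-- forward loop carrying (running, result); dr = running % 9, patched to 9 when 0
def cumulative_polarity (digits : List Int) : List Int :=
  (digits.foldl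
    (fun (st : Int × List Int) d =>
      let running := st.1 + d
      let dr := PySem.Int.mod running 9
      let dr := if dr = 0 then 9 else dr
      (running, st.2 ++ [dr]))
    (0, [])).2

-- ===== PORT B =====
-- total = sum(digits); loop over reversed(digits) appending (total % 9 or 9), subtracting d; out.reverse()
def cumulative_polarity_alt (digits : List Int) : List Int :=
  ((digits.reverse.foldl
    (fun (st : Int × List Int) d =>
      (st.1 - d,
       st.2 ++ [if PySem.Int.mod st.1 9 = 0 then 9 else PySem.Int.mod st.1 9]))
    (digits.sum, [])).2).reverse

-- ===== PRECONDITION & SPEC =====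
def Spec_cumulative_polarity (digits : List Int) (out : List Int) : Prop := out = cumulative_polarity_alt digits
instance (digits : List Int) (out : List Int) : Decidable (Spec_cumulative_polarity digits out) := by unfold Spec_cumulative_polarity; infer_instance

-- ===== CLAIM (what is proved, stated in full; the proofs are below) =====
def Claim_equal_cumulative_polarity : Prop := ∀ (digits : List Int), Dom_cumulative_polarity digits → Spec_cumulative_polarity digits (cumulative_polarity digits)

-- ===== LEMMAS AND PROOFS =====

-- digital root of a prefix sum
def pvDr (s : Int) : Int := if PySem.Int.mod s 9 = 0 then 9 else PySem.Int.mod s 9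

-- prefix sums starting from r
def pvScan (r : Int) : List Int → List Int
  | [] => []
  | d :: t => (r + d) :: pvScan (r + d) t

theorem foldA_eq (l : List Int) (r : Int) (acc : List Int) :
    (l.foldl
      (fun (st : Int × List Int) d =>
        let running := st.1 + d
        let dr := PySem.Int.mod running 9
        let dr := if dr = 0 then 9 else dr
        (running, st.2 ++ [dr])) (r, acc)).2 = acc ++ (pvScan r l).map pvDr := by
  induction l generalizing r acc with
  | nil => simp [pvScan]
  | cons d t ih =>
      simp only [List.foldl_cons]
      rw [ih]
      simp [pvScan, pvDr]

theorem foldB_eq (l : List Int) (t : Int) (acc : List Int) :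
    (l.foldr
      (fun d (st : Int × List Int) =>
        (st.1 - d,
         st.2 ++ [if PySem.Int.mod st.1 9 = 0 then 9 else PySem.Int.mod st.1 9]))
      (t, acc)) = (t - l.sum, acc ++ ((pvScan (t - l.sum) l).map pvDr).reverse) := by
  induction l generalizing t acc with
  | nil => simp [pvScan]
  | cons d tl ih =>
      simp only [List.foldr_cons, ih, pvScan, List.sum_cons, List.map_cons, List.reverse_cons]
      rw [show t - (d + tl.sum) + d = t - tl.sum by ring]
      simp only [Prod.mk.injEq]
      exact ⟨by ring, by simp [pvDr]⟩

-- ===== VERDICT (by name: the statement is the Claim_ definition above) =====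
theorem cumulative_polarity_spec : Claim_equal_cumulative_polarity := by
  intro digits _
  unfold Spec_cumulative_polarity cumulative_polarity cumulative_polarity_alt
  rw [foldA_eq, List.foldl_reverse]
  have h := foldB_eq digits digits.sum []
  rw [h]
  simp
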